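-- pv_equiv track=rewrite | github.com/pypi-data/pypi-mirror-335 | packages/jimuflow/jimuflow-1.0.6-py3-none-any.whl/jimuflow/gui/web_element_xpath_tool.py | merge_xpath
-- ===== SOURCE A (Python) =====
-- from collections import defaultdict
--
-- def merge_xpath(xpath_list: list[str]) -> str:
--     if len(xpath_list) == 1:
--         return xpath_list[0]
--     processed_xpath_list = []
--     for xpath in xpath_list:
--         arr = xpath.split('|')
--         for i in arr:
--             processed_xpath_list.append([p.strip() for p in i.strip().split('/')])
--     group_by_merged_xpath = defaultdict(list)
--     merged_xpath_list = []
--     for xpath1 in processed_xpath_list: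
--         if xpath1 in merged_xpath_list:
--             continue
--         found_match = False
--         for xpath2 in processed_xpath_list:
--             if xpath2 == xpath1 or len(xpath1) != len(xpath2):
--                 continue
--             merged_xpath = []
--             idx_mismatch_times = 0
--             for i in range(len(xpath1)):
--                 if xpath1[i] == xpath2[i]:
--                     merged_xpath.append(xpath1[i])
--                 elif idx_mismatch_times > 0:
--                     break
--                 else:
--                     tag1, idx1 = parse_path_node(xpath1[i])
--                     tag2, idx2 = parse_path_node(xpath2[i])
--                     if tag1 != tag2:
--                         break
--                     idx_mismatch_times = 1
--                     merged_xpath.append(tag1)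
--             if len(merged_xpath) != len(xpath1):
--                 continue
--             merged_xpath = '/'.join(merged_xpath)
--             group_by_merged_xpath[merged_xpath].append(xpath1)
--             group_by_merged_xpath[merged_xpath].append(xpath2)
--             merged_xpath_list.append(xpath1)
--             merged_xpath_list.append(xpath2)
--             found_match = True
--             break
--         if not found_match:
--             group_by_merged_xpath['/'.join(xpath1)].append(xpath1)
--     return ' | '.join([k for k in group_by_merged_xpath.keys()])
--
-- def parse_path_node(node: str):
--     idx1 = node.find('[')
--     if idx1 == -1:
--         return node, None
--     idx2 = node.rfind(']')
--     if idx2 != len(node) - 1: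
--         return node, None
--     return node[:idx1], node[idx1 + 1:idx2]
-- ===== SOURCE B (Python) =====
-- def parse_path_node(node: str):
--     idx1 = node.find('[')
--     if idx1 == -1:
--         return node, None
--     idx2 = node.rfind(']')
--     if idx2 != len(node) - 1:
--         return node, None
--     return node[:idx1], node[idx1 + 1:idx2]
--
--
-- def merge_xpath(xpath_list: list[str]) -> str:
--     if len(xpath_list) == 1:
--         return xpath_list[0]
--     paths = []
--     for xpath in xpath_list:
--         for part in xpath.split('|'):
--             paths.append([p.strip() for p in part.strip().split('/')])
--     # One-position-wildcard signatures: (i, nodes with nodes[i] replaced by its tag).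
--     # Two distinct paths are mergeable iff they share a signature.
--     flat = []  # (signature key, path index), in path order
--     for j, nodes in enumerate(paths):
--         for i, node in enumerate(nodes):
--             tag, _ = parse_path_node(node)
--             flat.append(((i, tuple(nodes[:i] + [tag] + nodes[i + 1:])), j))
--     buckets = {}
--     for key, j in flat:
--         buckets.setdefault(key, []).append(j)
--     # Per signature only two entries can ever matter for a query:
--     # the first index, and the first index holding a different path.
--     index = {}
--     for key, bucket in buckets.items():
--         j0 = bucket[0]
--         j1 = None
--         for j in bucket[1:]:
--             if paths[j] != paths[j0]:
--                 j1 = j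
--                 break
--         index[key] = (j0, j1)
--     out_keys = []
--     seen = set()
--     merged = set()
--     for nodes in paths:
--         t = tuple(nodes)
--         if t in merged:
--             continue
--         best = None  # (matching path index, merged key)
--         for i, node in enumerate(nodes):
--             tag, _ = parse_path_node(node)
--             sig = nodes[:i] + [tag] + nodes[i + 1:]
--             e = index.get((i, tuple(sig)))
--             if e is None:
--                 continue
--             j0, j1 = e
--             cand = j0 if paths[j0] != nodes else j1
--             if cand is not None and (best is None or cand < best[0]):
--                 best = (cand, '/'.join(sig))
--         if best is None:
--             key = '/'.join(nodes)
--         else: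
--             j, key = best
--             merged.add(t)
--             merged.add(tuple(paths[j]))
--         if key not in seen:
--             seen.add(key)
--             out_keys.append(key)
--     return ' | '.join(out_keys)
-- ===== Notes on version B (the rewrite author's own statement) =====
-- stated objective: faster
-- what changed: B replaces A's quadratic scan over all path pairs by a dict indexing each path under its one-position-wildcard signatures (position i, nodes with node i replaced by its tag), reduced to the first entry and first differing entry per signature, so each path's earliest merge partner is found by O(L) dict lookups instead of an O(n*L) scan.
import Mathlib
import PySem

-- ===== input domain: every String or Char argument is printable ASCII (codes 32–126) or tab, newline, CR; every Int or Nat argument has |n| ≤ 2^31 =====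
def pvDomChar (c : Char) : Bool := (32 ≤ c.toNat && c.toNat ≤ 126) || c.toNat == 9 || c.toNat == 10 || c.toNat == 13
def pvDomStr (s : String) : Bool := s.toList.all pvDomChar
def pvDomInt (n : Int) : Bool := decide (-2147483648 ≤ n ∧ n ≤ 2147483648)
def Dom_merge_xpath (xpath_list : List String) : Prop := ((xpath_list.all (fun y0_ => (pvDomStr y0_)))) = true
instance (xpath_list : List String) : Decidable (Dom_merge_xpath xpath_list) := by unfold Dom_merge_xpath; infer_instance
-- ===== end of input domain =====

-- B replaces A's quadratic scan for a merge partner by a hash index of one-position-wildcard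
-- signatures built in a single pass (objective: faster).

-- shared helper: both Python files define the identical parse_path_node
def parse_path_node (node : String) : String × Option String :=
  let idx1 := PySem.Str.find node "["
  if idx1 == -1 then (node, none)
  else
    let idx2 := PySem.Str.rfind node "]"
    if idx2 != PySem.Str.len node - 1 then (node, none)
    else (PySem.Str.slice node none (some idx1),
          some (PySem.Str.slice node (some (idx1 + 1)) (some idx2)))

-- shared helper: the identical preprocessing loop of both Python files
-- (split on '|', strip, split on '/', strip each piece); separators are nonempty so split? is always some
def processList (xpath_list : List String) : List (List String) :=
  xpath_list.foldl (fun acc xpath =>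
    ((PySem.Str.split? xpath "|").getD []).foldl (fun acc2 i =>
      acc2 ++ [((PySem.Str.split? (PySem.Str.strip i) "/").getD []).map (fun p => PySem.Str.strip p)]) acc) []

-- ===== PORT A =====
-- A's innermost 'for i in range(len(xpath1))' with break: recursion over the two
-- (equal-length, guarded by the caller) lists; state = (merged, idx_mismatch_times)
def innerLoopA : List String → List String → List String → Nat → List String
  | [], _, merged, _ => merged
  | _ :: _, [], merged, _ => merged
  | n1 :: t1, n2 :: t2, merged, times =>
    if n1 == n2 then innerLoopA t1 t2 (merged ++ [n1]) times
    else if times > 0 then merged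
    else
      let tag1 := (parse_path_node n1).1
      let tag2 := (parse_path_node n2).1
      if tag1 != tag2 then merged
      else innerLoopA t1 t2 (merged ++ [tag1]) 1

-- A's 'for xpath2 in processed_xpath_list: … break' — first xpath2 that merges
def tryMatchA (xpath1 : List String) : List (List String) → Option (String × List String)
  | [] => none
  | x2 :: rest =>
    if x2 == xpath1 || xpath1.length != x2.length then tryMatchA xpath1 rest
    else
      let merged := innerLoopA xpath1 x2 [] 0
      if merged.length != xpath1.length then tryMatchA xpath1 rest
      else some (PySem.Str.join "/" merged, x2)

def merge_xpath (xpath_list : List String) : String :=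
  if xpath_list.length == 1 then PySem.List.pyGetD xpath_list 0 ""
  else
    let processed := processList xpath_list
    let st := processed.foldl
      (fun (st : PySem.Dict String (List (List String)) × List (List String)) x1 =>
        if st.2.contains x1 then st
        else
          match tryMatchA x1 processed with
          | some (mk, x2) =>
            (((st.1.modify mk [] (· ++ [x1])).modify mk [] (· ++ [x2])), st.2 ++ [x1] ++ [x2])
          | none => (st.1.modify (PySem.Str.join "/" x1) [] (· ++ [x1]), st.2))
      (PySem.Dict.empty, [])
    PySem.Str.join " | " st.1.keys

-- ===== PORT B =====
-- nodes[:i] + [tag] + nodes[i+1:]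
def sigOf (nodes : List String) (i : Int) (node : String) : List String :=
  PySem.List.slice nodes none (some i) ++ [(parse_path_node node).1]
    ++ PySem.List.slice nodes (some (i + 1)) none

-- flat list of ((i, signature), path index)
def flatSigs (paths : List (List String)) : List ((Int × List String) × Int) :=
  (PySem.List.enumerate paths 0).foldl (fun acc p =>
    acc ++ (PySem.List.enumerate p.2 0).map (fun q => ((q.1, sigOf p.2 q.1 q.2), p.1))) []

-- first index in the bucket tail whose path differs from the bucket head's path
def firstDiffIdx (paths : List (List String)) (p0 : List String) : List Int → Option Int
  | [] => none
  | j :: rest => if PySem.List.pyGetD paths j [] != p0 then some j else firstDiffIdx paths p0 rest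

-- signature -> (first index, first index holding a different path)
def buildIndex (paths : List (List String)) :
    PySem.Dict (Int × List String) (Int × Option Int) :=
  let buckets := (flatSigs paths).foldl
    (fun d p => d.modify p.1 [] (· ++ [p.2])) PySem.Dict.empty
  buckets.items.foldl (fun d p =>
    match p.2 with
    | [] => d
    | j0 :: rest =>
      d.insert p.1 (j0, firstDiffIdx paths (PySem.List.pyGetD paths j0 []) rest)) PySem.Dict.empty

-- earliest mergeable partner of `nodes` (by path index), with the merged key
def bestMatch (paths : List (List String))
    (idx : PySem.Dict (Int × List String) (Int × Option Int))
    (nodes : List String) : Option (Int × String) :=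
  (PySem.List.enumerate nodes 0).foldl (fun best q =>
    let sig := sigOf nodes q.1 q.2
    match idx.get? (q.1, sig) with
    | none => best
    | some e =>
      match (if PySem.List.pyGetD paths e.1 [] != nodes then some e.1 else e.2 : Option Int) with
      | none => best
      | some c =>
        match best with
        | none => some (c, PySem.Str.join "/" sig)
        | some b => if c < b.1 then some (c, PySem.Str.join "/" sig) else best) none

def merge_xpath_alt (xpath_list : List String) : String :=
  if xpath_list.length == 1 then PySem.List.pyGetD xpath_list 0 ""
  else
    let paths := processList xpath_list
    let idx := buildIndex paths
    let st := paths.foldl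
      (fun (st : List String × PySem.Set String × PySem.Set (List String)) nodes =>
        if PySem.Set.contains st.2.2 nodes then st
        else
          match bestMatch paths idx nodes with
          | none =>
            let key := PySem.Str.join "/" nodes
            if PySem.Set.contains st.2.1 key then st
            else (st.1 ++ [key], PySem.Set.add st.2.1 key, st.2.2)
          | some jk =>
            let merged := PySem.Set.add (PySem.Set.add st.2.2 nodes)
              (PySem.List.pyGetD paths jk.1 [])
            if PySem.Set.contains st.2.1 jk.2 then (st.1, st.2.1, merged)
            else (st.1 ++ [jk.2], PySem.Set.add st.2.1 jk.2, merged))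
      ([], PySem.Set.empty, PySem.Set.empty)
    PySem.Str.join " | " st.1

-- ===== PRECONDITION & SPEC =====
def Spec_merge_xpath (xpath_list : List String) (out : String) : Prop := out = merge_xpath_alt xpath_list
instance (xpath_list : List String) (out : String) : Decidable (Spec_merge_xpath xpath_list out) := by unfold Spec_merge_xpath; infer_instance

-- ===== CLAIM (what is proved, stated in full; the proofs are below) =====
def Claim_equal_merge_xpath : Prop := ∀ (xpath_list : List String), Dom_merge_xpath xpath_list → Spec_merge_xpath xpath_list (merge_xpath xpath_list)

-- ===== LEMMAS AND PROOFS =====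

-- ======== proof-side vocabulary ========
def tagOf (n : String) : String := (parse_path_node n).1
def atP (paths : List (List String)) (j : Int) : List String := PySem.List.pyGetD paths j []
def sigTD (x : List String) (i : Nat) : List String :=
  x.take i ++ [tagOf (x.getD i "")] ++ x.drop (i + 1)
def spec0 : List String → List String → Option (List String)
  | [], [] => some []
  | n1 :: t1, n2 :: t2 =>
    if n1 = n2 then (spec0 t1 t2).map (n1 :: ·)
    else if tagOf n1 = tagOf n2 then (if t1 = t2 then some (tagOf n1 :: t1) else none)
    else none
  | _, _ => none
def mer? (x1 x2 : List String) : Option (List String) :=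
  if x2 = x1 ∨ x1.length ≠ x2.length then none else spec0 x1 x2

-- ======== inner loop of A ========
theorem innerLoopA_self (l : List String) : ∀ acc times, innerLoopA l l acc times = acc ++ l := by
  induction l with
  | nil => intro acc times; simp [innerLoopA]
  | cons n t ih => intro acc times; simp [innerLoopA, ih]

theorem innerLoopA_one_lt (l1 l2 : List String) (hlen : l1.length = l2.length) (hne : l1 ≠ l2) :
    ∀ acc, (innerLoopA l1 l2 acc 1).length < acc.length + l1.length := by
  induction l1 generalizing l2 with
  | nil => cases l2 with
    | nil => exact absurd rfl hne
    | cons n2 t2 => simp at hlen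
  | cons n1 t1 ih =>
    cases l2 with
    | nil => simp at hlen
    | cons n2 t2 =>
      intro acc
      by_cases h : n1 = n2
      · subst h
        have ht : t1 ≠ t2 := fun h => hne (by rw [h])
        simp only [innerLoopA, BEq.rfl, if_pos]
        have := ih t2 (by simpa using hlen) ht (acc ++ [n1])
        simp at this ⊢; omega
      · simp only [innerLoopA]
        rw [if_neg (by simpa using h)]
        simp

theorem innerLoopA_zero_some (l1 l2 m : List String) (h : spec0 l1 l2 = some m) :
    ∀ acc, innerLoopA l1 l2 acc 0 = acc ++ m := by
  induction l1 generalizing l2 m with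
  | nil => cases l2 with
    | nil => simp [spec0] at h; intro acc; simp [innerLoopA, ← h]
    | cons n2 t2 => simp [spec0] at h
  | cons n1 t1 ih =>
    cases l2 with
    | nil => simp [spec0] at h
    | cons n2 t2 =>
      intro acc
      by_cases he : n1 = n2
      · subst he
        simp only [spec0, if_pos, reduceIte] at h
        obtain ⟨m', hm', rfl⟩ := Option.map_eq_some_iff.mp h
        simp only [innerLoopA, BEq.rfl, if_pos]
        rw [ih t2 m' hm']
        simp
      · simp only [spec0, if_neg he] at h
        by_cases ht : tagOf n1 = tagOf n2
        · rw [if_pos ht] at h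
          by_cases htt : t1 = t2
          · rw [if_pos htt] at h
            simp only [innerLoopA]
            rw [if_neg (by simpa using he), if_neg (by omega)]
            rw [if_neg (by simp [tagOf] at ht ⊢; exact ht)]
            subst htt
            rw [innerLoopA_self]
            simp only [Option.some.injEq] at h
            simp [← h, tagOf]
          · rw [if_neg htt] at h; simp at h
        · rw [if_neg ht] at h; simp at h

theorem innerLoopA_zero_none (l1 l2 : List String) (h : spec0 l1 l2 = none)
    (hlen : l1.length = l2.length) :
    ∀ acc, (innerLoopA l1 l2 acc 0).length < acc.length + l1.length := by
  induction l1 generalizing l2 with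
  | nil => cases l2 with
    | nil => simp [spec0] at h
    | cons n2 t2 => simp at hlen
  | cons n1 t1 ih =>
    cases l2 with
    | nil => simp at hlen
    | cons n2 t2 =>
      intro acc
      by_cases he : n1 = n2
      · subst he
        simp only [spec0, reduceIte, Option.map_eq_none_iff] at h
        simp only [innerLoopA, BEq.rfl, if_pos]
        have := ih t2 h (by simpa using hlen) (acc ++ [n1])
        simp at this ⊢; omega
      · simp only [spec0, if_neg he] at h
        simp only [innerLoopA]
        rw [if_neg (by simpa using he), if_neg (by omega)]
        by_cases ht : tagOf n1 = tagOf n2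
        · rw [if_pos ht] at h
          by_cases htt : t1 = t2
          · rw [if_pos htt] at h; simp at h
          · rw [if_neg (by simp [tagOf] at ht ⊢; exact ht)]
            have := innerLoopA_one_lt t1 t2 (by simpa using hlen) htt (acc ++ [tagOf n1])
            simp [tagOf] at this ⊢; omega
        · rw [if_pos (by simp [tagOf] at ht ⊢; exact ht)]
          simp

theorem spec0_lengths (l1 l2 m : List String) (h : spec0 l1 l2 = some m) :
    m.length = l1.length ∧ l2.length = l1.length := by
  induction l1 generalizing l2 m with
  | nil => cases l2 with
    | nil => simp [spec0] at h; simp [← h]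
    | cons n2 t2 => simp [spec0] at h
  | cons n1 t1 ih =>
    cases l2 with
    | nil => simp [spec0] at h
    | cons n2 t2 =>
      by_cases he : n1 = n2
      · subst he
        simp only [spec0, reduceIte] at h
        obtain ⟨m', hm', rfl⟩ := Option.map_eq_some_iff.mp h
        have := ih t2 m' hm'
        simp; omega
      · simp only [spec0, if_neg he] at h
        by_cases ht : tagOf n1 = tagOf n2
        · rw [if_pos ht] at h
          by_cases htt : t1 = t2
          · rw [if_pos htt] at h
            simp only [Option.some.injEq] at h
            subst htt
            simp [← h]
          · rw [if_neg htt] at h; simp at h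
        · rw [if_neg ht] at h; simp at h

theorem tryMatchA_eq_find (x1 : List String) (l : List (List String)) :
    tryMatchA x1 l = (l.find? (fun x2 => (mer? x1 x2).isSome)).map
      (fun x2 => (PySem.Str.join "/" ((mer? x1 x2).getD []), x2)) := by
  induction l with
  | nil => simp [tryMatchA]
  | cons x2 rest ih =>
    by_cases hskip : x2 = x1 ∨ x1.length ≠ x2.length
    · have h1 : (x2 == x1 || x1.length != x2.length) = true := by
        rcases hskip with h | h
        · simp [h]
        · simp [h]
      have hm : mer? x1 x2 = none := by simp [mer?, hskip]
      simp only [tryMatchA, h1, if_pos]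
      rw [ih]
      rw [List.find?_cons_of_neg (by simp [hm])]
    · push_neg at hskip
      have h1 : (x2 == x1 || x1.length != x2.length) = false := by
        simp [hskip.1, hskip.2]
      have hm : mer? x1 x2 = spec0 x1 x2 := by
        simp [mer?, hskip.1, hskip.2]
      simp only [tryMatchA, h1, Bool.false_eq_true, if_false]
      cases hs : spec0 x1 x2 with
      | some m =>
        rw [innerLoopA_zero_some x1 x2 m hs []]
        have hlen := spec0_lengths x1 x2 m hs
        rw [List.find?_cons_of_pos (by simp [hm, hs])]
        simp [hlen.1, hm, hs]
      | none =>
        have hlt := innerLoopA_zero_none x1 x2 hs hskip.2 []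
        simp only [List.length_nil, Nat.zero_add] at hlt
        rw [if_pos (by simp; omega)]
        rw [ih, List.find?_cons_of_neg (by simp [hm, hs])]

-- ======== signatures ========
theorem sigTD_zero (n : String) (t : List String) : sigTD (n :: t) 0 = tagOf n :: t := by
  simp [sigTD]

theorem sigTD_cons (n : String) (t : List String) (i : Nat) :
    sigTD (n :: t) (i + 1) = n :: sigTD t i := by
  simp [sigTD]

theorem spec0_some_iff (l1 l2 : List String) (hne : l1 ≠ l2) (m : List String) :
    spec0 l1 l2 = some m ↔
      ∃ i, i < l1.length ∧ i < l2.length ∧ sigTD l1 i = sigTD l2 i ∧ m = sigTD l1 i := by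
  induction l1 generalizing l2 m with
  | nil =>
    cases l2 with
    | nil => exact absurd rfl hne
    | cons n2 t2 => simp [spec0]
  | cons n1 t1 ih =>
    cases l2 with
    | nil => simp [spec0]
    | cons n2 t2 =>
      by_cases he : n1 = n2
      · subst he
        have ht : t1 ≠ t2 := fun h => hne (by rw [h])
        simp only [spec0, reduceIte]
        constructor
        · intro h
          obtain ⟨m', hm', rfl⟩ := Option.map_eq_some_iff.mp h
          obtain ⟨i, hi1, hi2, hsig, rfl⟩ := (ih t2 ht m').mp hm'
          exact ⟨i + 1, by simpa using hi1, by simpa using hi2,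
            by rw [sigTD_cons, sigTD_cons, hsig], by rw [sigTD_cons]⟩
        · rintro ⟨i, hi1, hi2, hsig, rfl⟩
          cases i with
          | zero =>
            rw [sigTD_zero, sigTD_zero] at hsig
            exact absurd (List.cons.injEq .. ▸ hsig).2 ht
          | succ i =>
            rw [sigTD_cons, sigTD_cons] at hsig
            have hsig' : sigTD t1 i = sigTD t2 i := (List.cons.injEq .. ▸ hsig).2
            rw [sigTD_cons]
            exact Option.map_eq_some_iff.mpr ⟨sigTD t1 i,
              (ih t2 ht _).mpr ⟨i, by simpa using hi1, by simpa using hi2, hsig', rfl⟩, rfl⟩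
      · simp only [spec0, if_neg he]
        constructor
        · intro h
          by_cases htag : tagOf n1 = tagOf n2
          · rw [if_pos htag] at h
            by_cases htt : t1 = t2
            · rw [if_pos htt] at h
              simp only [Option.some.injEq] at h
              exact ⟨0, by simp, by simp, by rw [sigTD_zero, sigTD_zero, htag, htt],
                by rw [sigTD_zero, ← h]⟩
            · rw [if_neg htt] at h; simp at h
          · rw [if_neg htag] at h; simp at h
        · rintro ⟨i, hi1, hi2, hsig, rfl⟩
          cases i with
          | zero =>
            rw [sigTD_zero, sigTD_zero] at hsig
            have h1 : tagOf n1 = tagOf n2 := (List.cons.injEq .. ▸ hsig).1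
            have h2 : t1 = t2 := (List.cons.injEq .. ▸ hsig).2
            rw [if_pos h1, if_pos h2, sigTD_zero]
          | succ i =>
            rw [sigTD_cons, sigTD_cons] at hsig
            exact absurd (List.cons.injEq .. ▸ hsig).1 he

theorem sig_agree (l1 l2 : List String) (i : Nat) (hi1 : i < l1.length) (hi2 : i < l2.length)
    (h : sigTD l1 i = sigTD l2 i) :
    l1.length = l2.length ∧ ∀ k, k ≠ i → l1.getD k "" = l2.getD k "" := by
  induction l1 generalizing l2 i with
  | nil => simp at hi1
  | cons n1 t1 ih =>
    cases l2 with
    | nil => simp at hi2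
    | cons n2 t2 =>
      cases i with
      | zero =>
        rw [sigTD_zero, sigTD_zero] at h
        have h2 : t1 = t2 := (List.cons.injEq .. ▸ h).2
        subst h2
        refine ⟨by simp, ?_⟩
        intro k hk
        cases k with
        | zero => exact absurd rfl hk
        | succ k => simp
      | succ i =>
        rw [sigTD_cons, sigTD_cons] at h
        have h1 : n1 = n2 := (List.cons.injEq .. ▸ h).1
        have h2 : sigTD t1 i = sigTD t2 i := (List.cons.injEq .. ▸ h).2
        obtain ⟨hl, ha⟩ := ih t2 i (by simpa using hi1) (by simpa using hi2) h2
        refine ⟨by simpa using hl, ?_⟩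
        intro k hk
        cases k with
        | zero => simpa using h1
        | succ k => simpa using ha k (by omega)

theorem sig_unique (l1 l2 : List String) (i i' : Nat) (hne : i ≠ i')
    (hi1 : i < l1.length) (hi2 : i < l2.length) (hi1' : i' < l1.length) (hi2' : i' < l2.length)
    (h : sigTD l1 i = sigTD l2 i) (h' : sigTD l1 i' = sigTD l2 i') : l1 = l2 := by
  obtain ⟨hl, ha⟩ := sig_agree l1 l2 i hi1 hi2 h
  obtain ⟨_, ha'⟩ := sig_agree l1 l2 i' hi1' hi2' h'
  apply List.ext_getElem hl
  intro k hk1 hk2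
  by_cases hki : k = i
  · subst hki
    have := ha' k (by omega)
    simpa [List.getD_eq_getElem?_getD, List.getElem?_eq_getElem, hk1, hk2] using this
  · have := ha k hki
    simpa [List.getD_eq_getElem?_getD, List.getElem?_eq_getElem, hk1, hk2] using this

-- ======== B-side: signatures, buckets, index ========
def hasKey (key : Int × List String) (nodes : List String) : Bool :=
  (PySem.List.enumerate nodes 0).any (fun q => (q.1, sigOf nodes q.1 q.2) == key)

def bucketsOf (paths : List (List String)) (key : Int × List String) : List Int :=
  (((flatSigs paths).filter (fun p => p.1 == key)).map (fun p => p.2))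

theorem sigOf_natCast (nodes : List String) (k : Nat) (node : String) :
    sigOf nodes (k : Int) node = nodes.take k ++ [tagOf node] ++ nodes.drop (k + 1) := by
  unfold sigOf
  rw [PySem.List.slice_to nodes (by positivity), PySem.List.slice_from nodes (by positivity)]
  norm_num
  rfl

theorem sigOf_getElem (nodes : List String) (k : Nat) (hk : k < nodes.length) :
    sigOf nodes (k : Int) nodes[k] = sigTD nodes k := by
  rw [sigOf_natCast, sigTD]
  congr 2
  rw [List.getD_eq_getElem?_getD, List.getElem?_eq_getElem hk]
  rfl

theorem flatSigs_eq (paths : List (List String)) :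
    flatSigs paths = (PySem.List.enumerate paths 0).flatMap
      (fun p => (PySem.List.enumerate p.2 0).map (fun q => ((q.1, sigOf p.2 q.1 q.2), p.1))) := by
  unfold flatSigs
  rw [PySem.List.foldl_append_eq_flatMap]
  simp

-- a filter keeping at most one element
theorem filter_eq_find?_of_unique {α : Type} (l : List α) (p : α → Bool)
    (h : l.Pairwise (fun a b => ¬(p a = true ∧ p b = true))) :
    l.filter p = (l.find? p).elim [] (fun a => [a]) := by
  induction l with
  | nil => simp
  | cons x t ih =>
    rw [List.pairwise_cons] at h
    by_cases hx : p x
    · rw [List.filter_cons_of_pos hx, List.find?_cons_of_pos hx]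
      have ht : t.filter p = [] := by
        rw [List.filter_eq_nil_iff]
        intro a ha hpa
        exact h.1 a ha ⟨hx, hpa⟩
      simp [ht]
    · rw [List.filter_cons_of_neg (by simpa using hx), List.find?_cons_of_neg (by simpa using hx)]
      exact ih h.2

theorem perPath_filter (nodes : List String) (j : Int) (key : Int × List String) :
    (((PySem.List.enumerate nodes 0).map (fun q => ((q.1, sigOf nodes q.1 q.2), j))).filter
        (fun p => p.1 == key)) = if hasKey key nodes then [(key, j)] else [] := by
  rw [List.filter_map]
  rw [filter_eq_find?_of_unique _ _ ?hu]
  case hu =>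
    apply (PySem.List.pairwise_lt_enumerate nodes 0).imp
    intro a b hab ⟨ha, hb⟩
    simp only [Function.comp] at ha hb
    have ha' : (a.1, sigOf nodes a.1 a.2) = key := by simpa using ha
    have hb' : (b.1, sigOf nodes b.1 b.2) = key := by simpa using hb
    have : a.1 = b.1 := by rw [show a.1 = key.1 from congrArg Prod.fst ha',
      show b.1 = key.1 from congrArg Prod.fst hb']
    omega
  by_cases hk : hasKey key nodes
  · rw [if_pos hk]
    obtain ⟨q, hq, hpq⟩ := List.any_eq_true.mp hk
    have hsome : (List.find? ((fun p => p.1 == key) ∘ fun q => ((q.1, sigOf nodes q.1 q.2), j))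
        (PySem.List.enumerate nodes 0)).isSome := by
      rw [List.find?_isSome]
      exact ⟨q, hq, by simpa [Function.comp] using hpq⟩
    obtain ⟨q0, hq0⟩ := Option.isSome_iff_exists.mp hsome
    have h0 := List.find?_some hq0
    simp only [Function.comp] at h0
    have h0' : (q0.1, sigOf nodes q0.1 q0.2) = key := by simpa using h0
    rw [hq0]
    simp [h0']
  · rw [if_neg hk]
    have hnone : List.find? ((fun p => p.1 == key) ∘ fun q => ((q.1, sigOf nodes q.1 q.2), j))
        (PySem.List.enumerate nodes 0) = none := by
      rw [List.find?_eq_none]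
      intro x hx hpx
      exact hk (List.any_eq_true.mpr ⟨x, hx, by simpa [Function.comp] using hpx⟩)
    rw [hnone]
    simp

theorem flatMap_if_singleton {α β : Type} (l : List α) (c : α → Bool) (f : α → β) :
    l.flatMap (fun a => if c a then [f a] else []) = (l.filter c).map f := by
  induction l with
  | nil => simp
  | cons x t ih =>
    by_cases hx : c x
    · simp [List.flatMap_cons, hx, ih, List.filter_cons_of_pos hx]
    · simp [List.flatMap_cons, hx, ih, List.filter_cons_of_neg (by simpa using hx)]

theorem bucket_eq (paths : List (List String)) (key : Int × List String) :
    bucketsOf paths key =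
      ((PySem.List.enumerate paths 0).filter (fun p => hasKey key p.2)).map (fun p => p.1) := by
  unfold bucketsOf
  rw [flatSigs_eq]
  rw [List.filter_flatMap, List.map_flatMap]
  have hcg : ∀ p ∈ PySem.List.enumerate paths 0,
      (List.map (fun r => r.2) (List.filter (fun r => r.1 == key)
        (List.map (fun q => ((q.1, sigOf p.2 q.1 q.2), p.1)) (PySem.List.enumerate p.2 0))))
      = (fun p => if hasKey key p.2 then [p.1] else []) p := by
    intro p _
    rw [perPath_filter p.2 p.1 key]
    by_cases h : hasKey key p.2 <;> simp [h]
  rw [List.flatMap_congr hcg]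
  exact flatMap_if_singleton _ _ _

theorem buckets_getD (paths : List (List String)) (key : Int × List String) :
    ((flatSigs paths).foldl (fun d p => d.modify p.1 [] (· ++ [p.2])) PySem.Dict.empty).getD key []
      = bucketsOf paths key := by
  rw [PySem.Dict.getD_foldl_modify_append]
  simp [bucketsOf]

theorem buckets_keys (paths : List (List String)) :
    ((flatSigs paths).foldl (fun d p => d.modify p.1 [] (· ++ [p.2])) PySem.Dict.empty).keys
      = PySem.Set.ofList ((flatSigs paths).map (fun p => p.1)) := by
  rw [PySem.Dict.keys_foldl_modify_key (flatSigs paths) (fun p => p.1) [] (fun _ p v => v ++ [p.2])]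
  simp [PySem.Set.update_nil_left]

theorem mem_keysFlat_iff_bucket_ne (paths : List (List String)) (key : Int × List String) :
    key ∈ (flatSigs paths).map (fun p => p.1) ↔ bucketsOf paths key ≠ [] := by
  unfold bucketsOf
  constructor
  · intro h hc
    obtain ⟨p, hp, hpk⟩ := List.mem_map.mp h
    rw [List.map_eq_nil_iff, List.filter_eq_nil_iff] at hc
    exact hc p hp (by simp [hpk])
  · intro h
    rcases he : (flatSigs paths).filter (fun p => p.1 == key) with _ | ⟨p, t⟩
    · exact absurd (by simp [he]) h
    · have hp : p ∈ (flatSigs paths).filter (fun p => p.1 == key) := by rw [he]; simp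
      have := List.mem_filter.mp hp
      exact List.mem_map.mpr ⟨p, this.1, by simpa using this.2⟩

-- the per-item step of buildIndex
def stepBI (paths : List (List String)) (d : PySem.Dict (Int × List String) (Int × Option Int))
    (p : (Int × List String) × List Int) : PySem.Dict (Int × List String) (Int × Option Int) :=
  match p.2 with
  | [] => d
  | j0 :: rest => d.insert p.1 (j0, firstDiffIdx paths (PySem.List.pyGetD paths j0 []) rest)

theorem stepBI_foldl_get?_of_not_mem (paths : List (List String))
    (l : List ((Int × List String) × List Int)) (key : Int × List String)
    (h : key ∉ l.map Prod.fst) :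
    ∀ d, ((l.foldl (stepBI paths) d).get? key) = d.get? key := by
  induction l with
  | nil => intro d; rfl
  | cons p t ih =>
    intro d
    simp only [List.map_cons, List.mem_cons] at h
    rw [List.foldl_cons]
    rw [ih (fun hm => h (Or.inr hm))]
    unfold stepBI
    cases p.2 with
    | nil => rfl
    | cons j0 rest => exact PySem.Dict.get?_insert_of_ne d _ (fun hc => h (Or.inl hc))

theorem stepBI_foldl_get?_found (paths : List (List String))
    (l : List ((Int × List String) × List Int)) (key : Int × List String)
    (j0 : Int) (rest : List Int) (hnd : (l.map Prod.fst).Nodup) (hmem : (key, j0 :: rest) ∈ l) :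
    ∀ d, ((l.foldl (stepBI paths) d).get? key) =
      some (j0, firstDiffIdx paths (PySem.List.pyGetD paths j0 []) rest) := by
  induction l with
  | nil => simp at hmem
  | cons p t ih =>
    intro d
    rw [List.map_cons, List.nodup_cons] at hnd
    rw [List.foldl_cons]
    rcases List.mem_cons.mp hmem with heq | hmem'
    · subst heq
      have hnm : key ∉ t.map Prod.fst := by simpa using hnd.1
      rw [stepBI_foldl_get?_of_not_mem paths t key hnm]
      exact PySem.Dict.get?_insert_self _ _ _
    · exact ih hnd.2 hmem' _
theorem buildIndex_get? (paths : List (List String)) (key : Int × List String) :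
    (buildIndex paths).get? key =
      match bucketsOf paths key with
      | [] => none
      | j0 :: rest => some (j0, firstDiffIdx paths (PySem.List.pyGetD paths j0 []) rest) := by
  unfold buildIndex
  have hfold : ∀ (d : PySem.Dict (Int × List String) (Int × Option Int)),
      (((flatSigs paths).foldl (fun d p => d.modify p.1 [] (· ++ [p.2]))
        PySem.Dict.empty).items).foldl (fun d p =>
          match p.2 with
          | [] => d
          | j0 :: rest => d.insert p.1 (j0, firstDiffIdx paths (PySem.List.pyGetD paths j0 []) rest)) d
      = (((flatSigs paths).foldl (fun d p => d.modify p.1 [] (· ++ [p.2]))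
        PySem.Dict.empty).items).foldl (stepBI paths) d := by
    intro d; rfl
  rw [hfold]
  set B := (flatSigs paths).foldl (fun d p => d.modify p.1 [] (· ++ [p.2])) PySem.Dict.empty with hB
  have hknd : B.keys.Nodup := by
    rw [hB]
    exact PySem.Dict.nodup_keys_foldl_modify_key _ _ _ _ _ PySem.Dict.nodup_keys_empty
  have hindnd : (B.items.map Prod.fst).Nodup := hknd
  cases hbk : bucketsOf paths key with
  | nil =>
    have hnm : key ∉ B.items.map Prod.fst := by
      intro hm
      have : key ∈ B.keys := hm
      rw [hB, buckets_keys] at this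
      have := (PySem.Set.mem_ofList _ _).mp this
      exact (mem_keysFlat_iff_bucket_ne paths key).mp this hbk
    rw [stepBI_foldl_get?_of_not_mem paths _ key hnm]
    rfl
  | cons j0 rest =>
    have hmm : key ∈ B.keys := by
      rw [hB, buckets_keys]
      exact (PySem.Set.mem_ofList _ _).mpr ((mem_keysFlat_iff_bucket_ne paths key).mpr (by rw [hbk]; simp))
    obtain ⟨⟨k', v⟩, hitem, hk'⟩ := List.mem_map.mp hmm
    rw [show k' = key from hk'] at hitem
    have hv : v = bucketsOf paths key := by
      have := PySem.Dict.getD_of_mem_items B hitem hknd []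
      rw [hB, buckets_getD] at this
      exact this.symm
    subst hv
    rw [hbk] at hitem
    rw [stepBI_foldl_get?_found paths B.items key j0 rest hindnd hitem]

-- ======== generic find?/fold lemmas ========
theorem find?_congr_mem {α : Type} (l : List α) (p q : α → Bool)
    (h : ∀ x ∈ l, p x = q x) : l.find? p = l.find? q := by
  induction l with
  | nil => rfl
  | cons x t ih =>
    have hx := h x (by simp)
    by_cases hp : p x
    · rw [List.find?_cons_of_pos hp, List.find?_cons_of_pos (by rw [← hx]; exact hp)]
    · rw [List.find?_cons_of_neg (by simpa using hp),
        List.find?_cons_of_neg (by rw [← hx]; simpa using hp)]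
      exact ih (fun x hm => h x (by simp [hm]))

theorem find?_filter' {α : Type} (l : List α) (p q : α → Bool) :
    (l.filter q).find? p = l.find? (fun x => q x && p x) := by
  induction l with
  | nil => rfl
  | cons x t ih =>
    by_cases hq : q x
    · rw [List.filter_cons_of_pos hq]
      by_cases hp : p x
      · rw [List.find?_cons_of_pos hp, List.find?_cons_of_pos (by simp [hp, hq])]
      · rw [List.find?_cons_of_neg (by simpa using hp),
          List.find?_cons_of_neg (by simp [hp, hq]), ih]
    · rw [List.filter_cons_of_neg (by simpa using hq),
        List.find?_cons_of_neg (by simp [hq]), ih]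

theorem find?_first_lt {α : Type} (l : List (Int × α)) (P : Int × α → Bool)
    (hpl : l.Pairwise (fun a b => a.1 < b.1)) (a : Int × α) (ha : l.find? P = some a)
    (b : Int × α) (hb : b ∈ l) (hPb : P b) : a.1 ≤ b.1 := by
  induction l with
  | nil => simp at ha
  | cons x t ih =>
    rw [List.pairwise_cons] at hpl
    by_cases hx : P x
    · rw [List.find?_cons_of_pos hx] at ha
      obtain rfl : x = a := by simpa using ha
      rcases List.mem_cons.mp hb with rfl | hb'
      · exact le_refl _
      · exact le_of_lt (hpl.1 b hb')
    · rw [List.find?_cons_of_neg (by simpa using hx)] at ha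
      rcases List.mem_cons.mp hb with rfl | hb'
      · exact absurd hPb (by simpa using hx)
      · exact ih hpl.2 ha hb'

theorem pairwise_lt_mem_eq {α : Type} (l : List (Int × α))
    (hpl : l.Pairwise (fun a b => a.1 < b.1)) (a b : Int × α)
    (ha : a ∈ l) (hb : b ∈ l) (hfst : a.1 = b.1) : a = b := by
  induction l with
  | nil => simp at ha
  | cons x t ih =>
    rw [List.pairwise_cons] at hpl
    rcases List.mem_cons.mp ha with rfl | ha' <;> rcases List.mem_cons.mp hb with h | hb'
    · rw [h]
    · exact absurd hfst (by have := hpl.1 b hb'; omega)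
    · subst h; exact absurd hfst (by have := hpl.1 a ha'; omega)
    · exact ih hpl.2 ha' hb'

def minStep (b : Option (Int × String)) (y : Int × String) : Option (Int × String) :=
  match b with
  | none => some y
  | some b' => if y.1 < b'.1 then some y else b

theorem minStep_none (y : Int × String) : minStep none y = some y := rfl
theorem minStep_some (b' : Int × String) (y : Int × String) :
    minStep (some b') y = if y.1 < b'.1 then some y else some b' := rfl

theorem foldl_minStep_eq (c : Int) (k : String) :
    ∀ (l : List (Int × String)) (b : Option (Int × String)),
      (((c, k) ∈ l ∧ (∀ b', b = some b' → c < b'.1)) ∨ b = some (c, k)) →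
      (∀ q ∈ l, q ≠ (c, k) → c < q.1) →
      (∀ q ∈ l, c ≤ q.1) →
      l.foldl minStep b = some (c, k) := by
  intro l
  induction l with
  | nil =>
    rintro b (⟨hm, _⟩ | rfl) _ _
    · simp at hm
    · rfl
  | cons y t ih =>
    rintro b hinit hstrict hle
    rw [List.foldl_cons]
    rcases hinit with ⟨hm, hb⟩ | rfl
    · by_cases hy : y = (c, k)
      · subst hy
        have hstep : minStep b (c, k) = some (c, k) := by
          cases b with
          | none => rfl
          | some b' => rw [minStep_some, if_pos (hb b' rfl)]
        rw [hstep]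
        exact ih (some (c, k)) (Or.inr rfl)
          (fun q hq => hstrict q (by simp [hq])) (fun q hq => hle q (by simp [hq]))
      · have hcy : c < y.1 := hstrict y (by simp) hy
        have hmt : (c, k) ∈ t := by
          rcases List.mem_cons.mp hm with h | h
          · exact absurd h.symm hy
          · exact h
        have hb' : ∀ b', minStep b y = some b' → c < b'.1 := by
          intro b' hb'
          cases b with
          | none => simp [minStep_none] at hb'; rw [← hb']; exact hcy
          | some b0 =>
            rw [minStep_some] at hb'
            by_cases hlt : y.1 < b0.1
            · rw [if_pos hlt] at hb'; simp at hb'; rw [← hb']; exact hcy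
            · rw [if_neg hlt] at hb'; simp at hb'; rw [← hb']; exact hb b0 rfl
        exact ih (minStep b y) (Or.inl ⟨hmt, hb'⟩)
          (fun q hq => hstrict q (by simp [hq])) (fun q hq => hle q (by simp [hq]))
    · have hstep : minStep (some (c, k)) y = some (c, k) := by
        have hc : ¬ y.1 < c := by have := hle y (by simp); omega
        show (if y.1 < (c, k).1 then some y else some (c, k)) = some (c, k)
        rw [if_neg (by simpa using hc)]
      rw [hstep]
      exact ih (some (c, k)) (Or.inr rfl)
        (fun q hq => hstrict q (by simp [hq])) (fun q hq => hle q (by simp [hq]))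

-- ======== candidate characterization ========
theorem firstDiffIdx_eq_find? (paths : List (List String)) (p0 : List String) (l : List Int) :
    firstDiffIdx paths p0 l = l.find? (fun j => PySem.List.pyGetD paths j [] != p0) := by
  induction l with
  | nil => rfl
  | cons j t ih =>
    by_cases h : PySem.List.pyGetD paths j [] != p0
    · rw [List.find?_cons_of_pos (p := fun j => PySem.List.pyGetD paths j [] != p0) h]
      unfold firstDiffIdx
      rw [if_pos h]
    · rw [List.find?_cons_of_neg (p := fun j => PySem.List.pyGetD paths j [] != p0) (by simpa using h)]
      unfold firstDiffIdx
      rw [if_neg (by simpa using h)]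
      exact ih

def candAt (paths : List (List String)) (x1 : List String) (key : Int × List String) : Option Int :=
  match (buildIndex paths).get? key with
  | none => none
  | some e => if PySem.List.pyGetD paths e.1 [] != x1 then some e.1 else e.2

theorem candAt_eq_find? (paths : List (List String)) (x1 : List String) (key : Int × List String) :
    candAt paths x1 key = (bucketsOf paths key).find? (fun j => PySem.List.pyGetD paths j [] != x1) := by
  unfold candAt
  rw [buildIndex_get?]
  cases hbk : bucketsOf paths key with
  | nil => rfl
  | cons j0 rest =>
    simp only
    by_cases h0 : PySem.List.pyGetD paths j0 [] != x1
    · rw [if_pos h0, List.find?_cons_of_pos (p := fun j => PySem.List.pyGetD paths j [] != x1) h0]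
    · rw [if_neg (by simpa using h0),
        List.find?_cons_of_neg (p := fun j => PySem.List.pyGetD paths j [] != x1) (by simpa using h0)]
      have hx1 : x1 = PySem.List.pyGetD paths j0 [] := by
        have := h0; simp at this; exact this.symm
      rw [firstDiffIdx_eq_find?, hx1]

theorem mem_enumerate_atP (paths : List (List String)) (p : Int × List String)
    (hp : p ∈ PySem.List.enumerate paths 0) : PySem.List.pyGetD paths p.1 [] = p.2 := by
  obtain ⟨k, hk, rfl⟩ := (PySem.List.mem_enumerate_iff paths 0 p).mp hp
  simp only [Int.zero_add]
  rw [PySem.List.pyGetD_natCast]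
  exact List.getD_eq_getElem _ _ hk

theorem candAt_eq_enum_find? (paths : List (List String)) (x1 : List String)
    (key : Int × List String) :
    candAt paths x1 key = ((PySem.List.enumerate paths 0).find?
      (fun p => hasKey key p.2 && p.2 != x1)).map (fun p => p.1) := by
  rw [candAt_eq_find?, bucket_eq, List.find?_map]
  have hcg : ((PySem.List.enumerate paths 0).filter (fun p => hasKey key p.2)).find?
        ((fun j => PySem.List.pyGetD paths j [] != x1) ∘ fun p => p.1)
      = ((PySem.List.enumerate paths 0).filter (fun p => hasKey key p.2)).find?
        (fun p => p.2 != x1) := by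
    apply find?_congr_mem
    intro p hp
    have hpe : p ∈ PySem.List.enumerate paths 0 := (List.mem_filter.mp hp).1
    simp only [Function.comp]
    rw [mem_enumerate_atP paths p hpe]
  rw [hcg, find?_filter']

theorem hasKey_iff (key : Int × List String) (nodes : List String) :
    hasKey key nodes = true ↔ ∃ k, k < nodes.length ∧ key = ((k : Int), sigTD nodes k) := by
  unfold hasKey
  rw [List.any_eq_true]
  constructor
  · rintro ⟨q, hq, hpq⟩
    obtain ⟨k, hk, rfl⟩ := (PySem.List.mem_enumerate_iff nodes 0 q).mp hq
    refine ⟨k, hk, ?_⟩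
    have : ((0 + (k : Int), nodes[k]).1, sigOf nodes (0 + (k : Int), nodes[k]).1
        (0 + (k : Int), nodes[k]).2) = key := by simpa using hpq
    rw [← this]
    simp only [Int.zero_add]
    rw [sigOf_getElem nodes k hk]
  · rintro ⟨k, hk, rfl⟩
    refine ⟨((k : Int), nodes[k]), (PySem.List.mem_enumerate_iff nodes 0 _).mpr
      ⟨k, hk, by simp⟩, ?_⟩
    simp only
    rw [sigOf_getElem nodes k hk]
    simp

-- ======== bestMatch characterization ========
theorem foldB_eq (paths : List (List String)) (nodes : List String) :
    ∀ (l : List (Int × String)) (init : Option (Int × String)),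
    l.foldl (fun best q =>
      let sig := sigOf nodes q.1 q.2
      match (buildIndex paths).get? (q.1, sig) with
      | none => best
      | some e =>
        match (if PySem.List.pyGetD paths e.1 [] != nodes then some e.1 else e.2 : Option Int) with
        | none => best
        | some c =>
          match best with
          | none => some (c, PySem.Str.join "/" sig)
          | some b => if c < b.1 then some (c, PySem.Str.join "/" sig) else best) init
      = (l.filterMap (fun q =>
          (candAt paths nodes (q.1, sigOf nodes q.1 q.2)).map
            (fun c => (c, PySem.Str.join "/" (sigOf nodes q.1 q.2))))).foldl minStep init := by
  intro l
  induction l with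
  | nil => intro init; rfl
  | cons q t ih =>
    intro init
    rw [List.foldl_cons, List.filterMap_cons]
    unfold candAt
    cases hg : (buildIndex paths).get? (q.1, sigOf nodes q.1 q.2) with
    | none => simp only [hg, Option.map_none]; exact ih init
    | some e =>
      simp only [hg]
      cases hc : (if PySem.List.pyGetD paths e.1 [] != nodes then some e.1 else e.2 : Option Int) with
      | none => simp only [Option.map_none]; exact ih init
      | some c =>
        simp only [Option.map_some]
        rw [List.foldl_cons]
        cases init with
        | none => exact ih _
        | some b =>
          rw [minStep_some]
          by_cases hlt : c < b.1
          · rw [if_pos hlt]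
            have : (if c < b.1 then some ((c, PySem.Str.join "/" (sigOf nodes q.1 q.2)) : Int × String) else some b)
                = some (c, PySem.Str.join "/" (sigOf nodes q.1 q.2)) := by rw [if_pos hlt]
            simp only [hlt, if_pos]
            exact ih _
          · rw [if_neg hlt]
            simp only [hlt, if_neg, if_false]
            exact ih _

theorem bestMatch_eq_fold (paths : List (List String)) (nodes : List String) :
    bestMatch paths (buildIndex paths) nodes
      = ((PySem.List.enumerate nodes 0).filterMap (fun q =>
          (candAt paths nodes (q.1, sigOf nodes q.1 q.2)).map
            (fun c => (c, PySem.Str.join "/" (sigOf nodes q.1 q.2))))).foldl minStep none := by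
  unfold bestMatch
  exact foldB_eq paths nodes _ none

theorem Q_imp_mer (nodes x2 : List String) (k : Nat) (hk : k < nodes.length)
    (hkey : hasKey ((k : Int), sigTD nodes k) x2 = true) (hne : x2 ≠ nodes) :
    mer? nodes x2 = some (sigTD nodes k) := by
  obtain ⟨k2, hk2, heq⟩ := (hasKey_iff _ x2).mp hkey
  have hkk : (k : Int) = (k2 : Int) := congrArg Prod.fst heq
  have hkk' : k2 = k := by exact_mod_cast hkk.symm
  rw [hkk'] at hk2 heq
  have hsig : sigTD nodes k = sigTD x2 k := congrArg Prod.snd heq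
  have hlen := (sig_agree nodes x2 k hk hk2 hsig).1
  have hs0 : spec0 nodes x2 = some (sigTD nodes k) :=
    (spec0_some_iff nodes x2 (fun h => hne h.symm) _).mpr ⟨k, hk, hk2, hsig, rfl⟩
  unfold mer?
  rw [if_neg (by push_neg; exact ⟨hne, hlen⟩)]
  exact hs0

theorem mer_imp_Q (nodes x2 m : List String) (h : mer? nodes x2 = some m) :
    x2 ≠ nodes ∧ ∃ k, k < nodes.length ∧ k < x2.length ∧
      hasKey ((k : Int), sigTD nodes k) x2 = true ∧ m = sigTD nodes k := by
  unfold mer? at h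
  by_cases hcond : x2 = nodes ∨ nodes.length ≠ x2.length
  · rw [if_pos hcond] at h; simp at h
  · rw [if_neg hcond] at h
    push_neg at hcond
    obtain ⟨i, hi1, hi2, hsig, rfl⟩ := (spec0_some_iff nodes x2 (fun hx => hcond.1 hx.symm) m).mp h
    exact ⟨hcond.1, i, hi1, hi2,
      (hasKey_iff _ x2).mpr ⟨i, hi2, by rw [hsig]⟩, rfl⟩

theorem bestMatch_correct (paths : List (List String)) (nodes : List String) :
    bestMatch paths (buildIndex paths) nodes
      = ((PySem.List.enumerate paths 0).find? (fun p => (mer? nodes p.2).isSome)).map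
          (fun p => (p.1, PySem.Str.join "/" ((mer? nodes p.2).getD []))) := by
  rw [bestMatch_eq_fold]
  set fB := (fun q : Int × String =>
    (candAt paths nodes (q.1, sigOf nodes q.1 q.2)).map
      (fun c => (c, PySem.Str.join "/" (sigOf nodes q.1 q.2)))) with hfB
  cases hW : (PySem.List.enumerate paths 0).find? (fun p => (mer? nodes p.2).isSome) with
  | none =>
    have hnone := List.find?_eq_none.mp hW
    have hcands : (PySem.List.enumerate nodes 0).filterMap fB = [] := by
      rw [List.filterMap_eq_nil_iff]
      intro q hq
      obtain ⟨k, hk, rfl⟩ := (PySem.List.mem_enumerate_iff nodes 0 q).mp hq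
      rw [hfB]
      simp only [Int.zero_add, Option.map_eq_none_iff]
      rw [sigOf_getElem nodes k hk, candAt_eq_enum_find?]
      rw [Option.map_eq_none_iff, List.find?_eq_none]
      intro p hp hR
      have hkey : hasKey ((k : Int), sigTD nodes k) p.2 = true := (Bool.and_eq_true_iff.mp hR).1
      have hne : p.2 ≠ nodes := by simpa using (Bool.and_eq_true_iff.mp hR).2
      exact hnone p hp (by rw [Q_imp_mer nodes p.2 k hk hkey hne]; rfl)
    rw [hcands]
    rfl
  | some w =>
    have hPw := List.find?_some hW
    have hwmem := List.mem_of_find?_eq_some hW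
    obtain ⟨m, hm⟩ := Option.isSome_iff_exists.mp hPw
    obtain ⟨hwne, i0, hi0, hi0', hkey0, rfl⟩ := mer_imp_Q nodes w.2 m hm
    have hgetD : (mer? nodes w.2).getD [] = sigTD nodes i0 := by rw [hm]; rfl
    set c0 : Int × String := (w.1, PySem.Str.join "/" (sigTD nodes i0)) with hc0
    -- the candidate derived from any admissible k finds exactly a first Mer-partner
    have hcand_some : ∀ (k : Nat), k < nodes.length →
        ∀ c, candAt paths nodes ((k : Int), sigTD nodes k) = some c →
        ∃ p, p ∈ PySem.List.enumerate paths 0 ∧ c = p.1 ∧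
          hasKey ((k : Int), sigTD nodes k) p.2 = true ∧ p.2 ≠ nodes ∧ w.1 ≤ p.1 := by
      intro k hk c hc
      rw [candAt_eq_enum_find?] at hc
      obtain ⟨p, hp, hpc⟩ := Option.map_eq_some_iff.mp hc
      have hRp := List.find?_some hp
      have hpmem := List.mem_of_find?_eq_some hp
      have hkeyp : hasKey ((k : Int), sigTD nodes k) p.2 = true := (Bool.and_eq_true_iff.mp hRp).1
      have hnep : p.2 ≠ nodes := by simpa using (Bool.and_eq_true_iff.mp hRp).2
      have hPp : (mer? nodes p.2).isSome = true := by
        rw [Q_imp_mer nodes p.2 k hk hkeyp hnep]; rfl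
      have hle := find?_first_lt _ _ (PySem.List.pairwise_lt_enumerate paths 0) w hW p hpmem hPp
      exact ⟨p, hpmem, hpc.symm, hkeyp, hnep, hle⟩
    have hsig_eq_of_eq_w : ∀ (k : Nat), k < nodes.length →
        hasKey ((k : Int), sigTD nodes k) w.2 = true → k = i0 := by
      intro k hk hkeyk
      by_contra hkne
      obtain ⟨k2, hk2, heq⟩ := (hasKey_iff _ w.2).mp hkeyk
      have hk2k : k2 = k := by
        have := congrArg Prod.fst heq; simp at this; omega
      rw [hk2k] at hk2 heq
      have hsigk : sigTD nodes k = sigTD w.2 k := congrArg Prod.snd heq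
      obtain ⟨k3, hk3, heq0⟩ := (hasKey_iff _ w.2).mp hkey0
      have hk30 : k3 = i0 := by
        have := congrArg Prod.fst heq0; simp at this; omega
      rw [hk30] at hk3 heq0
      have hsig0 : sigTD nodes i0 = sigTD w.2 i0 := congrArg Prod.snd heq0
      exact hwne (sig_unique nodes w.2 k i0 hkne hk hk2 hi0 hk3 hsigk hsig0).symm
    simp only [Option.map_some]
    rw [hgetD]
    have hpair : some (w.1, PySem.Str.join "/" (sigTD nodes i0)) = some ((c0.1, c0.2) : Int × String) := rfl
    rw [hpair]
    apply foldl_minStep_eq c0.1 c0.2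
    · left
      constructor
      · -- c0 ∈ cands
        rw [List.mem_filterMap]
        refine ⟨((i0 : Int), nodes[i0]), (PySem.List.mem_enumerate_iff nodes 0 _).mpr ⟨i0, hi0, by simp⟩, ?_⟩
        rw [hfB]
        simp only
        rw [sigOf_getElem nodes i0 hi0]
        have hcand : candAt paths nodes ((i0 : Int), sigTD nodes i0) = some w.1 := by
          rw [candAt_eq_enum_find?]
          have hRw : (hasKey ((i0 : Int), sigTD nodes i0) w.2 && w.2 != nodes) = true := by
            rw [Bool.and_eq_true]
            exact ⟨hkey0, by simpa using hwne⟩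
          have hsome : ((PySem.List.enumerate paths 0).find?
              (fun p => hasKey ((i0 : Int), sigTD nodes i0) p.2 && p.2 != nodes)).isSome := by
            rw [List.find?_isSome]
            exact ⟨w, hwmem, hRw⟩
          obtain ⟨p', hp'⟩ := Option.isSome_iff_exists.mp hsome
          obtain ⟨p'', hp''mem, hpc, hkeyp, hnep, hlew⟩ :=
            hcand_some i0 hi0 p'.1 (by rw [candAt_eq_enum_find?, hp']; rfl)
          have hlep : p'.1 ≤ w.1 :=
            find?_first_lt _ _ (PySem.List.pairwise_lt_enumerate paths 0) p' hp' w hwmem hRw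
          have hp'mem := List.mem_of_find?_eq_some hp'
          have : p' = w := pairwise_lt_mem_eq _ (PySem.List.pairwise_lt_enumerate paths 0)
            p' w hp'mem hwmem (by omega)
          rw [hp', this]
          rfl
        rw [hcand]
        rfl
      · intro b' hb'; cases hb'
    · -- strict minimality
      intro y hy hyne
      rw [List.mem_filterMap] at hy
      obtain ⟨q, hq, hfq⟩ := hy
      obtain ⟨k, hk, rfl⟩ := (PySem.List.mem_enumerate_iff nodes 0 q).mp hq
      rw [hfB] at hfq
      simp only [Int.zero_add] at hfq
      rw [sigOf_getElem nodes k hk] at hfq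
      obtain ⟨c, hc, rfl⟩ := Option.map_eq_some_iff.mp hfq
      obtain ⟨p, hpmem, rfl, hkeyp, hnep, hlew⟩ := hcand_some k hk c hc
      simp only
      rcases lt_or_eq_of_le hlew with h | h
      · exact h
      · exfalso
        -- p = w, so k = i0, so y = c0
        obtain ⟨p2, hp2mem, hp2c, hkeyp2, hnep2, _⟩ := hcand_some k hk p.1 (by assumption)
        have hpw : p = w := pairwise_lt_mem_eq _ (PySem.List.pairwise_lt_enumerate paths 0)
          p w hpmem hwmem h.symm
        subst hpw
        have := hsig_eq_of_eq_w k hk hkeyp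
        subst this
        exact hyne (by rw [hc0, h])
    · intro y hy
      rw [List.mem_filterMap] at hy
      obtain ⟨q, hq, hfq⟩ := hy
      obtain ⟨k, hk, rfl⟩ := (PySem.List.mem_enumerate_iff nodes 0 q).mp hq
      rw [hfB] at hfq
      simp only [Int.zero_add] at hfq
      rw [sigOf_getElem nodes k hk] at hfq
      obtain ⟨c, hc, rfl⟩ := Option.map_eq_some_iff.mp hfq
      obtain ⟨p, hpmem, rfl, _, _, hlew⟩ := hcand_some k hk c hc
      exact hlew

-- ======== A-side via enumerate, and the per-element correspondence ========
theorem snd_enum_find {α : Type} (P : α → Bool) :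
    ∀ (l : List α) (s : Int),
      ((PySem.List.enumerate l s).find? (fun p => P p.2)).map Prod.snd = l.find? P := by
  intro l
  induction l with
  | nil => intro s; rfl
  | cons x t ih =>
    intro s
    rw [PySem.List.enumerate_cons]
    by_cases hx : P x
    · rw [List.find?_cons_of_pos (p := fun p : Int × α => P p.2) (by simpa using hx),
        List.find?_cons_of_pos hx]
      rfl
    · rw [List.find?_cons_of_neg (p := fun p : Int × α => P p.2) (by simpa using hx),
        List.find?_cons_of_neg (by simpa using hx)]
      exact ih (s + 1)

theorem tryMatchA_enum (x1 : List String) (paths : List (List String)) :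
    tryMatchA x1 paths = ((PySem.List.enumerate paths 0).find?
        (fun p => (mer? x1 p.2).isSome)).map
      (fun p => (PySem.Str.join "/" ((mer? x1 p.2).getD []), p.2)) := by
  rw [tryMatchA_eq_find, ← snd_enum_find (fun x2 => (mer? x1 x2).isSome) paths 0, Option.map_map]
  cases hW : (PySem.List.enumerate paths 0).find? (fun p => (mer? x1 p.2).isSome) with
  | none => rfl
  | some w => rfl

-- ======== outer fold ========
def stepA (processed : List (List String))
    (st : PySem.Dict String (List (List String)) × List (List String))
    (x1 : List String) : PySem.Dict String (List (List String)) × List (List String) :=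
  if st.2.contains x1 then st
  else
    match tryMatchA x1 processed with
    | some (mk, x2) =>
      (((st.1.modify mk [] (· ++ [x1])).modify mk [] (· ++ [x2])), st.2 ++ [x1] ++ [x2])
    | none => (st.1.modify (PySem.Str.join "/" x1) [] (· ++ [x1]), st.2)

def stepB (paths : List (List String))
    (st : List String × PySem.Set String × PySem.Set (List String))
    (nodes : List String) : List String × PySem.Set String × PySem.Set (List String) :=
  if PySem.Set.contains st.2.2 nodes then st
  else
    match bestMatch paths (buildIndex paths) nodes with
    | none =>
      let key := PySem.Str.join "/" nodes
      if PySem.Set.contains st.2.1 key then st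
      else (st.1 ++ [key], PySem.Set.add st.2.1 key, st.2.2)
    | some jk =>
      let merged := PySem.Set.add (PySem.Set.add st.2.2 nodes)
        (PySem.List.pyGetD paths jk.1 [])
      if PySem.Set.contains st.2.1 jk.2 then (st.1, st.2.1, merged)
      else (st.1 ++ [jk.2], PySem.Set.add st.2.1 jk.2, merged)

def RelS (a : PySem.Dict String (List (List String)) × List (List String))
    (b : List String × PySem.Set String × PySem.Set (List String)) : Prop :=
  a.1.keys = b.1 ∧ (∀ k, k ∈ b.2.1 ↔ k ∈ b.1) ∧ (∀ x, x ∈ a.2 ↔ x ∈ b.2.2)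

theorem keys_after_modify (d : PySem.Dict String (List (List String))) (mk : String)
    (f : List (List String) → List (List String)) :
    (d.modify mk [] f).keys = if mk ∈ d.keys then d.keys else d.keys ++ [mk] := by
  rw [PySem.Dict.keys_modify]
  by_cases h : d.contains mk
  · rw [PySem.Dict.keys_insert_of_contains _ _ h,
      if_pos ((PySem.Dict.contains_iff_mem_keys _ _).mp h)]
  · rw [PySem.Dict.keys_insert_of_not_contains _ _ (by simpa using h), if_neg]
    intro hm
    exact h ((PySem.Dict.contains_iff_mem_keys _ _).mpr hm)

theorem step_corr (processed : List (List String)) (x1 : List String)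
    (a : PySem.Dict String (List (List String)) × List (List String))
    (b : List String × PySem.Set String × PySem.Set (List String))
    (h : RelS a b) : RelS (stepA processed a x1) (stepB processed b x1) := by
  obtain ⟨hkeys, hseen, hmerged⟩ := h
  unfold stepA stepB
  have hcond : (a.2.contains x1) = (PySem.Set.contains b.2.2 x1) := by
    by_cases hm : x1 ∈ a.2
    · rw [List.contains_iff_mem.mpr hm, ((PySem.Set.contains_iff b.2.2 x1).mpr ((hmerged x1).mp hm)).symm]
    · have h1 : a.2.contains x1 = false := by
        rw [← Bool.not_eq_true]; intro hc; exact hm (List.contains_iff_mem.mp hc)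
      have h2 : PySem.Set.contains b.2.2 x1 = false := by
        rw [← Bool.not_eq_true]; intro hc
        exact hm ((hmerged x1).mpr ((PySem.Set.contains_iff b.2.2 x1).mp hc))
      rw [h1, h2]
  by_cases hc : a.2.contains x1
  · rw [if_pos hc, if_pos (by rw [← hcond]; exact hc)]
    exact ⟨hkeys, hseen, hmerged⟩
  · rw [if_neg hc, if_neg (by rw [← hcond]; exact hc)]
    rw [tryMatchA_enum, bestMatch_correct]
    cases hW : (PySem.List.enumerate processed 0).find? (fun p => (mer? x1 p.2).isSome) with
    | none =>
      simp only [Option.map_none]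
      set key := PySem.Str.join "/" x1 with hkey
      have hkeyiff : key ∈ b.2.1 ↔ key ∈ a.1.keys := by rw [hkeys]; exact hseen key
      by_cases hks : key ∈ b.2.1
      · rw [if_pos ((PySem.Set.contains_iff _ _).mpr hks)]
        refine ⟨?_, hseen, hmerged⟩
        rw [keys_after_modify, if_pos (hkeyiff.mp hks), hkeys]
      · rw [if_neg (fun hcc => hks ((PySem.Set.contains_iff _ _).mp hcc))]
        refine ⟨?_, ?_, hmerged⟩
        · rw [keys_after_modify, if_neg (fun hm => hks (hkeyiff.mpr hm)), hkeys]
        · intro k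
          rw [PySem.Set.mem_add, List.mem_append, List.mem_singleton, hseen k]
    | some w =>
      simp only [Option.map_some]
      have hwmem := List.mem_of_find?_eq_some hW
      have hatp : PySem.List.pyGetD processed w.1 [] = w.2 := mem_enumerate_atP processed w hwmem
      set mk := PySem.Str.join "/" ((mer? x1 w.2).getD []) with hmk
      have hkeyiff : mk ∈ b.2.1 ↔ mk ∈ a.1.keys := by rw [hkeys]; exact hseen mk
      have hkeys2 : ((a.1.modify mk [] (· ++ [x1])).modify mk [] (· ++ [w.2])).keys
          = if mk ∈ a.1.keys then a.1.keys else a.1.keys ++ [mk] := by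
        rw [keys_after_modify, keys_after_modify]
        by_cases hmm : mk ∈ a.1.keys
        · rw [if_pos hmm, if_pos hmm]
        · rw [if_neg hmm, if_pos (by simp)]
      have hmergediff : ∀ x, x ∈ a.2 ++ [x1] ++ [w.2] ↔
          x ∈ PySem.Set.add (PySem.Set.add b.2.2 x1) (PySem.List.pyGetD processed w.1 []) := by
        intro x
        rw [hatp, PySem.Set.mem_add, PySem.Set.mem_add]
        simp only [List.mem_append, List.mem_singleton]
        rw [hmerged x]
      by_cases hks : mk ∈ b.2.1
      · rw [if_pos ((PySem.Set.contains_iff _ _).mpr hks)]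
        refine ⟨?_, hseen, hmergediff⟩
        rw [hkeys2, if_pos (hkeyiff.mp hks), hkeys]
      · rw [if_neg (fun hcc => hks ((PySem.Set.contains_iff _ _).mp hcc))]
        refine ⟨?_, ?_, hmergediff⟩
        · rw [hkeys2, if_neg (fun hm => hks (hkeyiff.mpr hm)), hkeys]
        · intro k
          rw [PySem.Set.mem_add, List.mem_append, List.mem_singleton, hseen k]

theorem fold_corr (processed : List (List String)) :
    ∀ (l : List (List String)) a b, RelS a b →
      RelS (l.foldl (stepA processed) a) (l.foldl (stepB processed) b) := by
  intro l
  induction l with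
  | nil => intro a b h; exact h
  | cons x t ih =>
    intro a b h
    rw [List.foldl_cons, List.foldl_cons]
    exact ih _ _ (step_corr processed x a b h)

theorem merge_xpath_eq_alt (xs : List String) : merge_xpath xs = merge_xpath_alt xs := by
  unfold merge_xpath merge_xpath_alt
  by_cases h : xs.length == 1
  · rw [if_pos h, if_pos h]
  · rw [if_neg (by simpa using h), if_neg (by simpa using h)]
    show PySem.Str.join " | "
        (((processList xs).foldl (stepA (processList xs)) (PySem.Dict.empty, [])).1.keys)
      = PySem.Str.join " | "
        (((processList xs).foldl (stepB (processList xs)) ([], PySem.Set.empty, PySem.Set.empty)).1)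
    have hinit : RelS (PySem.Dict.empty, ([] : List (List String)))
        (([] : List String), (PySem.Set.empty : PySem.Set String),
          (PySem.Set.empty : PySem.Set (List String))) := by
      refine ⟨rfl, ?_, ?_⟩ <;> intro k <;> simp [PySem.Set.empty]
    have hfold := fold_corr (processList xs) (processList xs) _ _ hinit
    rw [hfold.1]

-- ===== VERDICT (by name: the statement is the Claim_ definition above) =====
theorem merge_xpath_spec : Claim_equal_merge_xpath := by
  intro xpath_list _
  exact merge_xpath_eq_alt xpath_list
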